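-- pv_equiv track=rewrite | github.com/olivierinizan/KES2025 | vickey/restaurant/ContextVickey2Gold.py | compute_subc_max_size
-- ===== SOURCE A (Python) =====
-- def compute_subc_max_size(partition_from_all_context):
--     max_epsilon = 0
--     max_delta = 0
--     max_omega = 0
--
--     for l in partition_from_all_context:
--         pair = l[0]
--         context = l[1]
--
--         epsilon_size = len(context[0])
--         delta_size = len(context[1])
--         omega_size = len(context[2])
--
--         max_epsilon = max(epsilon_size,max_epsilon)
--         max_delta = max(delta_size,max_delta)
--         max_omega = max(omega_size,max_omega)
--
--     return max_epsilon,max_delta,max_omega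
-- ===== SOURCE B (Python) =====
-- def compute_subc_max_size(partition_from_all_context):
--     # sort each component's size list descending; the head is the maximum
--     eps = sorted((len(l[1][0]) for l in partition_from_all_context), reverse=True)
--     dlt = sorted((len(l[1][1]) for l in partition_from_all_context), reverse=True)
--     omg = sorted((len(l[1][2]) for l in partition_from_all_context), reverse=True)
--     return (eps[0] if eps else 0, dlt[0] if dlt else 0, omg[0] if omg else 0)
-- ===== Notes on version B (the rewrite author's own statement) =====
-- stated objective: alternative
-- what changed: Replaces the single pass maintaining three running maxima with a sort-then-select algorithm: each component's size list is sorted in descending order and the head (or 0 when empty) is the maximum.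
import Mathlib
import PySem

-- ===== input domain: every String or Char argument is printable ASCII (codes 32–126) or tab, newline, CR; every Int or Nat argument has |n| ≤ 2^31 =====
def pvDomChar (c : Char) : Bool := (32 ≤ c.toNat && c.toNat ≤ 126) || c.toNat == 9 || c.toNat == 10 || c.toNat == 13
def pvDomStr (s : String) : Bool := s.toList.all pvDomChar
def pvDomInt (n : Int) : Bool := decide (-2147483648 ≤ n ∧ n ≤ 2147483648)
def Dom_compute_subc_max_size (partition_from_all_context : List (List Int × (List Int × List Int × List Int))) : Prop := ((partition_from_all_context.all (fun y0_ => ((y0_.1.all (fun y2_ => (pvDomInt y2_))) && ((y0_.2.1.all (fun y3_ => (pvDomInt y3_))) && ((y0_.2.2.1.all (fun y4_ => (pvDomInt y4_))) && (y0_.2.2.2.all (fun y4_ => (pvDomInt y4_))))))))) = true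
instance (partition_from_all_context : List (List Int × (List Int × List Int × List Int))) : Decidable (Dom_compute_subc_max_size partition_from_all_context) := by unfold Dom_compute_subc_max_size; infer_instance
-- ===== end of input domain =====

-- B replaces A's single accumulating pass by sort-then-select: sort each size list descending, take the head.

-- ===== PORT A =====
-- A: one loop over the partition keeping three running maxima.
def compute_subc_max_size (partition_from_all_context : List (List Int × (List Int × List Int × List Int))) : Int × Int × Int :=
  partition_from_all_context.foldl
    (fun (s : Int × Int × Int) l =>
      let context := l.2
      let epsilon_size : Int := context.1.length
      let delta_size : Int := context.2.1.length
      let omega_size : Int := context.2.2.length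
      (max epsilon_size s.1, max delta_size s.2.1, max omega_size s.2.2))
    (0, 0, 0)

-- ===== PORT B =====
-- B: sort each component's size list descending; head (or 0 if empty) is the maximum.
def pvHeadOrZero (xs : List Int) : Int :=
  match xs with
  | [] => 0
  | m :: _ => m

def compute_subc_max_size_alt (partition_from_all_context : List (List Int × (List Int × List Int × List Int))) : Int × Int × Int :=
  let eps := PySem.List.sorted (partition_from_all_context.map (fun l => (l.2.1.length : Int))) (fun x => x) true
  let dlt := PySem.List.sorted (partition_from_all_context.map (fun l => (l.2.2.1.length : Int))) (fun x => x) true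
  let omg := PySem.List.sorted (partition_from_all_context.map (fun l => (l.2.2.2.length : Int))) (fun x => x) true
  (pvHeadOrZero eps, pvHeadOrZero dlt, pvHeadOrZero omg)

-- ===== PRECONDITION & SPEC =====
def Spec_compute_subc_max_size (partition_from_all_context : List (List Int × (List Int × List Int × List Int))) (out : Int × Int × Int) : Prop := out = compute_subc_max_size_alt partition_from_all_context
instance (partition_from_all_context : List (List Int × (List Int × List Int × List Int))) (out : Int × Int × Int) : Decidable (Spec_compute_subc_max_size partition_from_all_context out) := by unfold Spec_compute_subc_max_size; infer_instance

-- ===== CLAIM =====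
def Claim_equal_compute_subc_max_size : Prop := ∀ (partition_from_all_context : List (List Int × (List Int × List Int × List Int))), Dom_compute_subc_max_size partition_from_all_context → Spec_compute_subc_max_size partition_from_all_context (compute_subc_max_size partition_from_all_context)

-- ===== LEMMAS AND PROOFS =====
theorem pv_fold_split (xs : List (List Int × (List Int × List Int × List Int))) (a b c : Int) :
    xs.foldl
      (fun (s : Int × Int × Int) l =>
        let context := l.2
        let epsilon_size : Int := context.1.length
        let delta_size : Int := context.2.1.length
        let omega_size : Int := context.2.2.length
        (max epsilon_size s.1, max delta_size s.2.1, max omega_size s.2.2))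
      (a, b, c)
    = ((xs.map (fun l => (l.2.1.length : Int))).foldl max a,
       (xs.map (fun l => (l.2.2.1.length : Int))).foldl max b,
       (xs.map (fun l => (l.2.2.2.length : Int))).foldl max c) := by
  induction xs generalizing a b c with
  | nil => simp
  | cons x xs ih =>
      simp only [List.foldl_cons, List.map_cons]
      rw [ih]
      simp [max_comm]

theorem pv_foldl_max_le (xs : List Int) (a b : Int) (ha : a <= b) (h : forall x, x ∈ xs -> x <= b) :
    xs.foldl max a <= b := by
  induction xs generalizing a with
  | nil => simpa using ha
  | cons y ys ih =>
      simp only [List.foldl_cons]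
      exact ih (max a y) (max_le ha (h y (by simp))) (fun x hx => h x (by simp [hx]))

theorem pv_le_foldl_max (xs : List Int) (a : Int) : a <= xs.foldl max a := by
  induction xs generalizing a with
  | nil => simp
  | cons y ys ih =>
      simp only [List.foldl_cons]
      exact le_trans (le_max_left a y) (ih (max a y))

theorem pv_mem_le_foldl_max (xs : List Int) (a x : Int) (hx : x ∈ xs) : x <= xs.foldl max a := by
  induction xs generalizing a with
  | nil => simp at hx
  | cons y ys ih =>
      simp only [List.foldl_cons]
      rcases List.mem_cons.mp hx with h | h
      · subst h; exact le_trans (le_max_right a x) (pv_le_foldl_max ys _)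
      · exact ih (max a y) h

-- max via descending sort: foldl max 0 of a nonnegative list equals the head of its descending sort.
theorem pv_foldl_max_eq_sorted_head (xs : List Int) (hnn : forall x, x ∈ xs -> (0:Int) <= x) :
    xs.foldl max 0 = pvHeadOrZero (PySem.List.sorted xs (fun x => x) true) := by
  rcases h : PySem.List.sorted xs (fun x => x) true with _ | ⟨m, t⟩
  · have hx : xs = [] := (PySem.List.sorted_eq_nil_iff xs (fun x => x) true).mp h
    simp [hx, pvHeadOrZero]
  · have hm : m ∈ xs := by
      have : m ∈ PySem.List.sorted xs (fun x => x) true := by simp [h]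
      exact (PySem.List.mem_sorted xs (fun x => x) true m).mp this
    have hub : forall y, y ∈ xs -> y <= m := fun y hy =>
      PySem.List.key_head_sorted_rev_ge xs (fun x => x) h y hy
    simp only [pvHeadOrZero]
    exact le_antisymm (pv_foldl_max_le xs 0 m (hnn m hm) hub)
      (pv_mem_le_foldl_max xs 0 m hm)

-- ===== VERDICT =====
theorem compute_subc_max_size_spec : Claim_equal_compute_subc_max_size := by
  intro xs _
  unfold Spec_compute_subc_max_size compute_subc_max_size compute_subc_max_size_alt
  rw [pv_fold_split]
  refine Prod.ext ?_ (Prod.ext ?_ ?_) <;>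
    · simp only []
      rw [pv_foldl_max_eq_sorted_head]
      intro x hx
      rcases List.mem_map.mp hx with ⟨l, _, rfl⟩
      exact Int.natCast_nonneg _
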